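-- pv_equiv track=rewrite | github.com/PanoPepino/string_cosmo_communication | examples/debug.py | modify_template_import
-- ===== SOURCE A (Python) =====
-- def modify_template_import(file_content, template_name):
--     """Replace the template import line with the specified template."""
--     lines = file_content.split('\n')
--     modified_lines = []
--
--     for line in lines:
--         if 'import_string_cosmo_template' in line:
--             # Replace the template argument
--             modified_line = f'import_string_cosmo_template("{template_name}")'
--             modified_lines.append(modified_line)
--         else:
--             modified_lines.append(line)
--
--     return '\n'.join(modified_lines)
-- ===== SOURCE B (Python) =====
-- def modify_template_import(file_content, template_name):
--     """Replace the template import line with the specified template."""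
--     replacement = f'import_string_cosmo_template("{template_name}")'
--     pieces = []
--     current = []
--     for ch in file_content:
--         if ch == '\n':
--             line = ''.join(current)
--             pieces.append(replacement if 'import_string_cosmo_template' in line else line)
--             pieces.append('\n')
--             current = []
--         else:
--             current.append(ch)
--     line = ''.join(current)
--     pieces.append(replacement if 'import_string_cosmo_template' in line else line)
--     return ''.join(pieces)
-- ===== Notes on version B (the rewrite author's own statement) =====
-- stated objective: alternative
-- what changed: Replaces A's three-pass split('\n') / per-line loop / join pipeline with a single character-level pass that maintains the current line in a buffer and emits each processed line (and its newline) as soon as the line ends.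
import Mathlib
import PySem

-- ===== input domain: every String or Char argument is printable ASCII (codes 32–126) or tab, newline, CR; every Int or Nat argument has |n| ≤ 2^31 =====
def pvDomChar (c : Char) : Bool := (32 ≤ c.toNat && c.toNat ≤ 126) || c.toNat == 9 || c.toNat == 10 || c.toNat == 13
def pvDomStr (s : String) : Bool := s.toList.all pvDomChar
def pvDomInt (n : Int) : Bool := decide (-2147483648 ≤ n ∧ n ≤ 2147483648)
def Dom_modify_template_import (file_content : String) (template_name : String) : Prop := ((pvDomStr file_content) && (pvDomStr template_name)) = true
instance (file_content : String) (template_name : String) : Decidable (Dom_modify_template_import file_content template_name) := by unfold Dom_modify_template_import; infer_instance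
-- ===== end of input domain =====

-- B replaces A's three-pass split('\n') / per-line loop / join pipeline by one character-level pass
-- with an explicit current-line buffer, emitting each processed line and its newline as soon as the
-- line ends (objective: alternative decomposition, same O(n) cost).

-- ===== PORT A =====
def modify_template_import (file_content : String) (template_name : String) : String :=
  -- "\n" is a nonempty literal, so file_content.split('\n') never raises: split? is `some` and getD only totalizes
  let lines := (PySem.Str.split? file_content "\n").getD []
  let modified_lines := lines.foldl (fun acc line =>
    if PySem.Str.isIn "import_string_cosmo_template" line then
      acc ++ ["import_string_cosmo_template(\"" ++ template_name ++ "\")"]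
    else
      acc ++ [line]) ([] : List String)
  PySem.Str.join "\n" modified_lines

-- ===== PORT B =====
-- helper for B: process one finished line buffer (''.join(current), membership test, replacement)
def pvLineOut (template_name : String) (cur : List Char) : String :=
  let line := String.ofList cur
  if PySem.Str.isIn "import_string_cosmo_template" line then
    "import_string_cosmo_template(\"" ++ template_name ++ "\")"
  else line

-- helper for B: the body of B's single for-loop over the characters
def pvStepB (template_name : String) (st : List String × List Char) (ch : Char) : List String × List Char :=
  if ch = '\n' then (st.1 ++ [pvLineOut template_name st.2, "\n"], [])
  else (st.1, st.2 ++ [ch])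

def modify_template_import_alt (file_content : String) (template_name : String) : String :=
  let fin := file_content.toList.foldl (pvStepB template_name) ([], [])
  PySem.Str.join "" (fin.1 ++ [pvLineOut template_name fin.2])

-- ===== PRECONDITION & SPEC =====
def Spec_modify_template_import (file_content : String) (template_name : String) (out : String) : Prop := out = modify_template_import_alt file_content template_name
instance (file_content : String) (template_name : String) (out : String) : Decidable (Spec_modify_template_import file_content template_name out) := by unfold Spec_modify_template_import; infer_instance

-- ===== CLAIM (what is proved, stated in full; the proofs are below) =====
def Claim_equal_modify_template_import : Prop := ∀ (file_content : String) (template_name : String), Dom_modify_template_import file_content template_name → Spec_modify_template_import file_content template_name (modify_template_import file_content template_name)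

-- ===== LEMMAS AND PROOFS =====

def pvMark : List Char := "import_string_cosmo_template".toList

def pvRepl (template_name : String) : List Char :=
  "import_string_cosmo_template(\"".toList ++ template_name.toList ++ "\")".toList

-- the per-line transformation, at the List Char level
def pvProc (template_name : String) (l : List Char) : List Char :=
  if PySem.Chars.isIn pvMark l then pvRepl template_name else l

-- reference line-splitter: pure structural recursion
def pvSplit : List Char → List (List Char)
  | [] => [[]]
  | c :: cs => if c = '\n' then [] :: pvSplit cs else (pvSplit cs).modifyHead (c :: ·)

theorem pvSplit_ne_nil (cs : List Char) : pvSplit cs ≠ [] := by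
  cases cs with
  | nil => simp [pvSplit]
  | cons c cs =>
      simp only [pvSplit]
      split_ifs
      · simp
      · intro h
        have := congrArg List.length h
        simp at this
        exact pvSplit_ne_nil cs this

theorem pvModifyHead_id {α : Type} (l : List α) : l.modifyHead (fun x => x) = l := by
  cases l <;> rfl

theorem pvGo_spec (fuel : Nat) (l cur : List Char) (acc : List (List Char))
    (h : l.length < fuel) :
    PySem.Chars.splitOn.go ['\n'] fuel l cur acc
      = acc.reverse ++ (pvSplit l).modifyHead (fun x => cur.reverse ++ x) := by
  induction fuel generalizing l cur acc with
  | zero => omega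
  | succ f ih =>
      cases l with
      | nil => simp [PySem.Chars.splitOn.go, pvSplit]
      | cons c rest =>
          by_cases hc : c = '\n'
          · subst hc
            have hpre : List.isPrefixOf ['\n'] ('\n' :: rest) = true := by
              simp [List.isPrefixOf]
            simp only [PySem.Chars.splitOn.go, hpre, if_pos]
            rw [ih _ _ _ (by simpa using Nat.lt_of_succ_lt_succ h)]
            simp [pvSplit, pvModifyHead_id]
          · have hpre : List.isPrefixOf ['\n'] (c :: rest) = false := by
              simp only [List.isPrefixOf, Bool.and_true,
                beq_eq_false_iff_ne, ne_eq]
              exact fun hh => hc hh.symm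
            simp only [PySem.Chars.splitOn.go, hpre]
            rw [if_neg Bool.false_ne_true]
            rw [ih _ _ _ (by simpa using Nat.lt_of_succ_lt_succ h)]
            simp only [pvSplit, if_neg hc, List.modifyHead_modifyHead]
            congr 2
            funext x
            simp

theorem pvSplitOn_eq (cs : List Char) :
    PySem.Chars.splitOn cs ['\n'] = pvSplit cs := by
  unfold PySem.Chars.splitOn
  rw [pvGo_spec _ _ _ _ (by omega)]
  simp [pvModifyHead_id]

theorem pvJoin_nil_sep (l : List (List Char)) :
    PySem.Chars.join [] l = l.flatten := by
  induction l with
  | nil => simp [PySem.Chars.join_nil]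
  | cons a l ih =>
      cases l with
      | nil => simp [PySem.Chars.join_singleton]
      | cons b t =>
          rw [PySem.Chars.join_cons_cons]
          simp [ih]

theorem pvLineOut_toList (tn : String) (cur : List Char) :
    (pvLineOut tn cur).toList = pvProc tn cur := by
  simp only [pvLineOut, pvProc, PySem.Str.isIn_eq, String.toList_ofList, pvMark]
  split_ifs
  · simp [pvRepl, String.toList_append]
  · exact String.toList_ofList

theorem pvB_loop (tn : String) (cs : List Char) (acc : List String) (cur : List Char) :
    (((cs.foldl (pvStepB tn) (acc, cur)).1
        ++ [pvLineOut tn (cs.foldl (pvStepB tn) (acc, cur)).2]).map String.toList).flatten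
      = (acc.map String.toList).flatten
        ++ PySem.Chars.join ['\n']
            (((pvSplit cs).modifyHead (fun x => cur ++ x)).map (pvProc tn)) := by
  induction cs generalizing acc cur with
  | nil =>
      simp [pvSplit, PySem.Chars.join_singleton, pvLineOut_toList]
  | cons ch cs ih =>
      by_cases hch : ch = '\n'
      · subst hch
        simp only [List.foldl_cons, pvStepB]
        rw [ih]
        obtain ⟨h, t, hht⟩ := List.exists_cons_of_ne_nil (pvSplit_ne_nil cs)
        have hnl : ("\n" : String).toList = ['\n'] := by decide
        simp only [pvSplit, hht]
        simp [pvLineOut_toList, hnl, PySem.Chars.join_cons_cons,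
          List.append_assoc]
      · simp only [List.foldl_cons, pvStepB, if_neg hch]
        rw [ih]
        simp only [pvSplit, if_neg hch, List.modifyHead_modifyHead]
        have : ((fun x => cur ++ x) ∘ (ch :: ·)) = (fun x => (cur ++ [ch]) ++ x) := by
          funext x; simp
        rw [this]

theorem pvA_toList (fc tn : String) :
    (modify_template_import fc tn).toList
      = PySem.Chars.join ['\n'] ((pvSplit fc.toList).map (pvProc tn)) := by
  unfold modify_template_import
  have hsep : ("\n" : String).toList = ['\n'] := by decide
  -- extract the String-level line list from the split?_map bridge
  have hbridge := PySem.Str.split?_map fc "\n"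
  rw [hsep] at hbridge
  rw [show PySem.Chars.split? fc.toList ['\n'] = some (pvSplit fc.toList) by
        simp [PySem.Chars.split?, pvSplitOn_eq]] at hbridge
  obtain ⟨ls, hls, hmap⟩ := Option.map_eq_some_iff.mp hbridge
  rw [hls]
  simp only [Option.getD_some]
  have hbody : (fun (acc : List String) line =>
      if PySem.Str.isIn "import_string_cosmo_template" line then
        acc ++ ["import_string_cosmo_template(\"" ++ tn ++ "\")"]
      else acc ++ [line])
      = (fun acc line => acc ++ [if PySem.Str.isIn "import_string_cosmo_template" line then
          "import_string_cosmo_template(\"" ++ tn ++ "\")" else line]) := by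
    funext acc line; split_ifs <;> rfl
  rw [hbody, PySem.List.foldl_append_singleton_eq_map, List.nil_append,
    PySem.Str.toList_join, hsep, List.map_map, ← hmap, List.map_map]
  congr 1
  congr 1
  funext line
  simp only [Function.comp_apply, pvProc, pvMark, PySem.Str.isIn_eq]
  split_ifs
  · simp [pvRepl, String.toList_append]
  · rfl

theorem pvB_toList (fc tn : String) :
    (modify_template_import_alt fc tn).toList
      = PySem.Chars.join ['\n'] ((pvSplit fc.toList).map (pvProc tn)) := by
  unfold modify_template_import_alt
  rw [PySem.Str.toList_join]
  have hempty : ("" : String).toList = [] := by decide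
  rw [hempty, pvJoin_nil_sep]
  have := pvB_loop tn fc.toList [] []
  simp only [List.map_nil, List.flatten_nil, List.nil_append] at this
  rw [this]
  simp [pvModifyHead_id]

-- ===== VERDICT (by name: the statement is the Claim_ definition above) =====
theorem modify_template_import_spec : Claim_equal_modify_template_import := by
  intro fc tn _
  unfold Spec_modify_template_import
  rw [← String.toList_inj, pvA_toList, pvB_toList]
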